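-- pv_equiv track=rewrite | github.com/OrcusLabs/voynich | vw_suite.py | normalize_az
-- ===== SOURCE A (Python) =====
-- import unicodedata
-- from typing import Optional, List, Dict, Set, Tuple
--
-- def normalize_az(s: str) -> str:
--     """
--     Convert to a-z only; anything else becomes a boundary.
--     (Used for the --split_splats mode and for Gutenberg text.)
--     """
--     s = unicodedata.normalize("NFD", s)
--     out: List[str] = []
--     prev_space = False
--     for ch in s:
--         if unicodedata.category(ch) == "Mn":
--             continue
--         c = ch.lower()
--         if "a" <= c <= "z":
--             out.append(c)
--             prev_space = False
--         else:
--             if not prev_space: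
--                 out.append(" ")
--                 prev_space = True
--     return "".join(out)
-- ===== SOURCE B (Python) =====
-- import unicodedata
--
-- def normalize_az(s: str) -> str:
--     s = unicodedata.normalize("NFD", s)
--     cleaned = "".join(ch for ch in s if unicodedata.category(ch) != "Mn").lower()
--     out = []
--     i = 0
--     n = len(cleaned)
--     while i < n:
--         c = cleaned[i]
--         if "a" <= c <= "z":
--             out.append(c)
--             i += 1
--         else:
--             out.append(" ")
--             while i < n and not ("a" <= cleaned[i] <= "z"):
--                 i += 1
--     return "".join(out)
-- ===== Notes on version B (the rewrite author's own statement) =====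
-- stated objective: alternative
-- what changed: B first strips combining marks and lowercases the whole string in one pass, then collapses runs with an index-based skip loop (each maximal non-letter run consumed at once), replacing A's per-character prev_space state machine.
import Mathlib
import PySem

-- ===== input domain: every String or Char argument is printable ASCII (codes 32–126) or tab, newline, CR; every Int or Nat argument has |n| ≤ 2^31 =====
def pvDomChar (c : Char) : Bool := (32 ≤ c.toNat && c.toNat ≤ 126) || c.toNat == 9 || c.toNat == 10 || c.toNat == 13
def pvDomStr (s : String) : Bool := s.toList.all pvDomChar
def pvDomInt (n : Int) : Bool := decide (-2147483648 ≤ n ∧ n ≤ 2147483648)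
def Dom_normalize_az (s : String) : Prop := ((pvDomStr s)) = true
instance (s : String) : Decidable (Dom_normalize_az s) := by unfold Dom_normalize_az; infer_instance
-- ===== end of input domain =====

-- B replaces A's per-character prev_space state machine by: strip marks + lowercase the whole
-- string first, then collapse each maximal non-letter run to one space (alternative decomposition).

-- ===== PORT A =====
-- unicodedata.normalize("NFD", ·) is the identity on ASCII and no ASCII char has category "Mn":
-- both primitives are ported exactly on the stated ASCII domain (NFD = id, category ≠ "Mn" = false).
def pyCatIsMn (_c : Char) : Bool := false

-- the 'for ch in s' loop of A, with its prev_space flag; out is built forward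
def normAzLoop : List Char → Bool → List Char
  | [], _ => []
  | ch :: rest, prev =>
    if pyCatIsMn ch then normAzLoop rest prev
    else
      let c := PySem.Chars.lowerChar ch
      if 'a' ≤ c ∧ c ≤ 'z' then c :: normAzLoop rest false
      else if prev then normAzLoop rest prev
      else ' ' :: normAzLoop rest true

def normalize_az (s : String) : String :=
  String.mk (normAzLoop s.toList false)

-- ===== PORT B =====
-- inner 'while' skip loop of Source B: consume the whole non-letter run, emit one ' '
def collapseRuns : List Char → List Char
  | [] => []
  | c :: rest =>
    if 'a' ≤ c ∧ c ≤ 'z' then c :: collapseRuns rest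
    else ' ' :: collapseRuns (rest.dropWhile (fun d => !decide ('a' ≤ d ∧ d ≤ 'z')))
termination_by l => l.length
decreasing_by
  all_goals
    have := List.length_dropWhile_le (fun d => !decide ('a' ≤ d ∧ d ≤ 'z')) rest
  all_goals simp at this ⊢
  all_goals omega

def normalize_az_alt (s : String) : String :=
  String.mk (collapseRuns ((s.toList.filter (fun ch => !pyCatIsMn ch)).map PySem.Chars.lowerChar))

-- ===== PRECONDITION & SPEC =====
def Spec_normalize_az (s : String) (out : String) : Prop := out = normalize_az_alt s
instance (s : String) (out : String) : Decidable (Spec_normalize_az s out) := by unfold Spec_normalize_az; infer_instance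

-- ===== CLAIM (what is proved, stated in full; the proofs are below) =====
def Claim_equal_normalize_az : Prop := ∀ (s : String), Dom_normalize_az s → Spec_normalize_az s (normalize_az s)

-- ===== LEMMAS AND PROOFS =====
lemma normAzLoop_eq_collapseRuns (l : List Char) :
    normAzLoop l false = collapseRuns (l.map PySem.Chars.lowerChar) ∧
    normAzLoop l true =
      collapseRuns ((l.map PySem.Chars.lowerChar).dropWhile
        (fun d => !decide ('a' ≤ d ∧ d ≤ 'z'))) := by
  induction l with
  | nil => simp [normAzLoop, collapseRuns]
  | cons c rest ih =>
    by_cases h : 'a' ≤ PySem.Chars.lowerChar c ∧ PySem.Chars.lowerChar c ≤ 'z'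
    · simp [normAzLoop, collapseRuns, pyCatIsMn, h, ih.1]
    · have h' : PySem.Chars.lowerChar c < 'a' ∨ 'z' < PySem.Chars.lowerChar c := by
        rcases not_and_or.mp h with h1 | h1
        · exact Or.inl (not_le.mp h1)
        · exact Or.inr (not_le.mp h1)
      simp [normAzLoop, collapseRuns, pyCatIsMn, h, h', ih.2]

theorem normalize_az_spec : Claim_equal_normalize_az := by
  intro s _
  unfold Spec_normalize_az normalize_az normalize_az_alt
  simp [pyCatIsMn, (normAzLoop_eq_collapseRuns s.toList).1]
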